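-- pv_equiv track=rewrite | github.com/cyr0930/google_coding_competitions | kickstart/2019_practice/Kickstart_Alarm/solution.py | solution
-- ===== SOURCE A (Python) =====
-- def solution(N, K, x, y, C, D, E1, E2, F):
--     A = [(x+y) % F]
--     for i in range(2, N+1):
--         x, y = (C * x + D * y + E1) % F, (D * x + C * y + E2) % F
--         A.append((x+y) % F)
--     ans = 0
--     table = [0] * N
--     f = 1000000007
--     for i in range(N):
--         cur = i+1
--         for j in range(K):
--             table[i] = (table[i] + ((cur**(j+1)) % f)) % f
--     for i in range(N):
--         cur_ans = 0
--         for j in range(i+1):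
--             cur_ans = (cur_ans + table[j]) % f
--         cur_ans = (cur_ans * (N - i)) % f
--         cur_ans = (cur_ans * A[i]) % f
--         ans = (ans + cur_ans) % f
--     return ans
-- ===== SOURCE B (Python) =====
-- def solution(N, K, x, y, C, D, E1, E2, F):
--     # Sequence A is generated with the same recurrence as the original, modulo F.
--     A = [(x + y) % F]
--     for _ in range(2, N + 1):
--         x, y = (C * x + D * y + E1) % F, (D * x + C * y + E2) % F
--         A.append((x + y) % F)
--     # All the power-sum aggregation below is modulo the prime 1000000007, exactly
--     # as in the original; only the loop structure changes (running power and
--     # running prefix sum instead of re-exponentiation and inner re-summation).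
--     MOD = 1000000007
--     ans = 0
--     prefix = 0
--     for i in range(N):
--         cur = (i + 1) % MOD
--         t = 0
--         p = cur
--         for _ in range(K):
--             t = (t + p) % MOD
--             p = (p * cur) % MOD
--         prefix = (prefix + t) % MOD
--         ans = (ans + prefix * (N - i) % MOD * A[i]) % MOD
--     return ans
-- ===== Notes on version B (the rewrite author's own statement) =====
-- stated objective: faster
-- what changed: B keeps A's recurrence for the sequence (mod F) unchanged and, for the mod-1000000007 aggregation only, replaces A's fresh big-integer exponentiation cur**(j+1) per term by a running modular power and A's quadratic inner re-summation of table[0..i] by a running prefix sum, fusing the last two loops into one pass.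
import Mathlib
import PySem

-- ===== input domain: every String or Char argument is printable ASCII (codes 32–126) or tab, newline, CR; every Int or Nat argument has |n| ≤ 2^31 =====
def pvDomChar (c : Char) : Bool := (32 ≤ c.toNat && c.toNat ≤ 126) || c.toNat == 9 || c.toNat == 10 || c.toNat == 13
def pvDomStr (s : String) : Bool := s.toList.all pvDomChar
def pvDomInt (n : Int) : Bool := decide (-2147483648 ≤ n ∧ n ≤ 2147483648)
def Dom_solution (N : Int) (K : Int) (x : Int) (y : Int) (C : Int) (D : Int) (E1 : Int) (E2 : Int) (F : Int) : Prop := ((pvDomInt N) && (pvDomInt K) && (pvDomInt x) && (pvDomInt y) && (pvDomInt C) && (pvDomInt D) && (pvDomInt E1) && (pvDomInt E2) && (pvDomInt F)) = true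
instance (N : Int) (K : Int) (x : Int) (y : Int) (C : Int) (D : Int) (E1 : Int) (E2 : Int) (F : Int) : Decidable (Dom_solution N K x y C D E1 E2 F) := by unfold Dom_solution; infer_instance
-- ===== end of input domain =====

-- B keeps A's sequence recurrence (mod F) and, in the mod-1000000007 aggregation, replaces
-- per-term big-integer exponentiation by a running power and the quadratic inner
-- re-summation by a running prefix sum (objective: faster; measured).
-- Both Pythons build the sequence A with the same recurrence loop, shared here as pvBuildA.

-- ===== PORT A =====
-- the first loop of both Pythons: A = [(x+y)%F]; for i in range(2, N+1): x,y = …; A.append((x+y)%F)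
def pvBuildA (N : Int) (x : Int) (y : Int) (C : Int) (D : Int) (E1 : Int) (E2 : Int) (F : Int) : List Int :=
  ((PySem.List.pyRange 2 (N+1) 1).foldl
    (fun (s : Int × Int × List Int) _ =>
      let x' := PySem.Int.mod (C * s.1 + D * s.2.1 + E1) F
      let y' := PySem.Int.mod (D * s.1 + C * s.2.1 + E2) F
      (x', y', s.2.2 ++ [PySem.Int.mod (x' + y') F]))
    (x, y, [PySem.Int.mod (x + y) F])).2.2

def solution (N : Int) (K : Int) (x : Int) (y : Int) (C : Int) (D : Int) (E1 : Int) (E2 : Int) (F : Int) : Int :=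
  let A := pvBuildA N x y C D E1 E2 F
  let f : Int := 1000000007
  -- table[i] accumulated by the inner 'for j in range(K)' loop (each cell is independent)
  let table := (PySem.List.pyRange 0 N 1).map (fun i =>
    (PySem.List.pyRange 0 K 1).foldl
      (fun t j => PySem.Int.mod (t + PySem.Int.mod ((i+1) ^ (j+1).toNat) f) f) 0)
  (PySem.List.pyRange 0 N 1).foldl (fun ans i =>
    let c1 := (PySem.List.pyRange 0 (i+1) 1).foldl
      (fun c j => PySem.Int.mod (c + PySem.List.pyGetD table j 0) f) 0
    let c2 := PySem.Int.mod (c1 * (N - i)) f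
    let c3 := PySem.Int.mod (c2 * PySem.List.pyGetD A i 0) f
    PySem.Int.mod (ans + c3) f) 0

-- ===== PORT B =====
def solution_alt (N : Int) (K : Int) (x : Int) (y : Int) (C : Int) (D : Int) (E1 : Int) (E2 : Int) (F : Int) : Int :=
  let A := pvBuildA N x y C D E1 E2 F
  let MOD : Int := 1000000007
  ((PySem.List.pyRange 0 N 1).foldl (fun (s : Int × Int) i =>
    let cur := PySem.Int.mod (i+1) MOD
    let tp := (PySem.List.pyRange 0 K 1).foldl
      (fun (tp : Int × Int) _ => (PySem.Int.mod (tp.1 + tp.2) MOD, PySem.Int.mod (tp.2 * cur) MOD))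
      (0, cur)
    let pre := PySem.Int.mod (s.1 + tp.1) MOD
    (pre,
     PySem.Int.mod (s.2 + PySem.Int.mod (PySem.Int.mod (pre * (N - i)) MOD * PySem.List.pyGetD A i 0) MOD) MOD))
    ((0 : Int), (0 : Int))).2

-- ===== PRECONDITION & SPEC =====
-- Pre_ excludes exactly F = 0, where the Python A raises ZeroDivisionError on (x+y) % F (B raises there too).
def Pre_solution (N : Int) (K : Int) (x : Int) (y : Int) (C : Int) (D : Int) (E1 : Int) (E2 : Int) (F : Int) : Prop := F ≠ 0
instance (N : Int) (K : Int) (x : Int) (y : Int) (C : Int) (D : Int) (E1 : Int) (E2 : Int) (F : Int) : Decidable (Pre_solution N K x y C D E1 E2 F) := by unfold Pre_solution; infer_instance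
def pvWitness_solution : Int × Int × Int × Int × Int × Int × Int × Int × Int := (3, 2, 1, 2, 1, 2, 1, 1, 5)

def Spec_solution (N : Int) (K : Int) (x : Int) (y : Int) (C : Int) (D : Int) (E1 : Int) (E2 : Int) (F : Int) (out : Int) : Prop := out = solution_alt N K x y C D E1 E2 F
instance (N : Int) (K : Int) (x : Int) (y : Int) (C : Int) (D : Int) (E1 : Int) (E2 : Int) (F : Int) (out : Int) : Decidable (Spec_solution N K x y C D E1 E2 F out) := by unfold Spec_solution; infer_instance

-- ===== CLAIM (what is proved, stated in full; the proofs are below) =====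
def Claim_equal_solution : Prop := ∀ (N : Int) (K : Int) (x : Int) (y : Int) (C : Int) (D : Int) (E1 : Int) (E2 : Int) (F : Int), Dom_solution N K x y C D E1 E2 F → Pre_solution N K x y C D E1 E2 F → Spec_solution N K x y C D E1 E2 F (solution N K x y C D E1 E2 F)

-- ===== LEMMAS AND PROOFS =====

lemma pv_inner (cur : Int) : ∀ (n j0 : ℕ) (t : Int),
    (List.range' j0 n).foldl (fun t k => (t + cur ^ (k+1) % 1000000007) % 1000000007) t
    = ((List.range' j0 n).foldl
        (fun (tp : Int × Int) (_ : ℕ) => ((tp.1 + tp.2) % 1000000007, tp.2 * (cur % 1000000007) % 1000000007))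
        (t, cur ^ (j0+1) % 1000000007)).1 := by
  intro n
  induction n with
  | zero => intro j0 t; simp
  | succ m ih =>
    intro j0 t
    rw [List.range'_succ, List.foldl_cons, List.foldl_cons]
    have hp : cur ^ (j0+1) % 1000000007 * (cur % 1000000007) % 1000000007 = cur ^ (j0+1+1) % 1000000007 := by
      rw [← Int.mul_emod, ← pow_succ]
    rw [hp]
    exact ih (j0+1) _

lemma pv_table (K i : Int) :
    (PySem.List.pyRange 0 K 1).foldl (fun t j => (t + (i+1) ^ (j+1).toNat % 1000000007) % 1000000007) 0
    = ((PySem.List.pyRange 0 K 1).foldl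
        (fun (tp : Int × Int) (_ : Int) => ((tp.1 + tp.2) % 1000000007, tp.2 * ((i+1) % 1000000007) % 1000000007))
        (0, (i+1) % 1000000007)).1 := by
  rw [PySem.List.pyRange_zero, List.foldl_map, List.foldl_map]
  have h1 : ∀ k : ℕ, (((k:Int))+1).toNat = k+1 := by intro k; omega
  have h2 := pv_inner (i+1) K.toNat 0 0
  rw [List.range_eq_range']
  simp only [h1]
  simpa [List.range_eq_range', pow_one] using h2

lemma pv_outer (g a : ℕ → Int) (N : Int) : ∀ (n i0 : ℕ) (ans : Int),
    (List.range' i0 n).foldl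
      (fun ans k => (ans + (((List.range (k+1)).foldl (fun c j => (c + g j) % 1000000007) 0 * (N - (k:Int))) % 1000000007 * a k) % 1000000007) % 1000000007) ans
    = ((List.range' i0 n).foldl
        (fun (s : Int × Int) k =>
          ((s.1 + g k) % 1000000007,
           (s.2 + ((s.1 + g k) % 1000000007 * (N - (k:Int)) % 1000000007 * a k) % 1000000007) % 1000000007))
        ((List.range i0).foldl (fun c j => (c + g j) % 1000000007) 0, ans)).2 := by
  intro n
  induction n with
  | zero => intro i0 ans; simp
  | succ m ih =>
    intro i0 ans
    rw [List.range'_succ, List.foldl_cons, List.foldl_cons]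
    have hS : (List.range (i0+1)).foldl (fun c j => (c + g j) % 1000000007) 0
        = ((List.range i0).foldl (fun c j => (c + g j) % 1000000007) 0 + g i0) % 1000000007 := by
      rw [List.range_succ, List.foldl_append, List.foldl_cons, List.foldl_nil]
    rw [hS]
    have := ih (i0+1) ((ans + (((List.range i0).foldl (fun c j => (c + g j) % 1000000007) 0 + g i0) % 1000000007 * (N - (i0:Int)) % 1000000007 * a i0) % 1000000007) % 1000000007)
    rw [hS] at this
    exact this

def pvG (K : Int) (j : ℕ) : Int :=
  ((PySem.List.pyRange 0 K 1).foldl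
    (fun (tp : Int × Int) (_ : Int) => ((tp.1 + tp.2) % 1000000007, tp.2 * (((j:Int)+1) % 1000000007) % 1000000007))
    (0, ((j:Int)+1) % 1000000007)).1

-- ===== VERDICT (by name: the statement is the Claim_ definition above) =====
theorem solution_spec : Claim_equal_solution := by
  intro N K x y C D E1 E2 F _ _
  unfold Spec_solution solution solution_alt
  have hf : (0:Int) < 1000000007 := by norm_num
  simp only [PySem.Int.mod_eq_emod_of_pos hf]
  generalize pvBuildA N x y C D E1 E2 F = as
  rw [PySem.List.pyRange_zero N, List.foldl_map, List.foldl_map, List.range_eq_range']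
  refine (PySem.List.foldl_congr_mem (List.range' 0 N.toNat) _
      (fun ans (k : ℕ) => (ans + ((((List.range (k+1)).foldl (fun c j => (c + pvG K j) % 1000000007) 0)
        * (N - (k:Int))) % 1000000007 * PySem.List.pyGetD as (k:Int) 0) % 1000000007) % 1000000007)
      0 ?hc).trans ?main
  case hc =>
    intro ans k hk
    have hkN : k < N.toNat := by rcases List.mem_range'_1.mp hk with ⟨_, h⟩; omega
    congr 2
    rw [show ((k:Int)+1) = ((k+1:ℕ):Int) by push_cast; ring]
    rw [PySem.List.pyRange_zero_nat, List.foldl_map]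
    congr 4
    refine PySem.List.foldl_congr_mem _ _ _ _ ?_
    intro c j hj
    have hjN : j < N.toNat := by have := List.mem_range.mp hj; omega
    rw [List.map_map, PySem.List.pyGetD_natCast, ← List.range_eq_range',
      PySem.List.getD_map_range _ _ _ _ hjN]
    simp only [Function.comp]
    rw [pv_table K (j:Int)]
    rfl
  case main =>
    exact pv_outer (pvG K) (fun k => PySem.List.pyGetD as (k:Int) 0) N N.toNat 0 0
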